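-- pv_equiv track=rewrite | github.com/OkhotnikovFN/Yandex-Algorithms | trainings_1.0/hw_3/task_f/f.py | check_genome_matching
-- ===== SOURCE A (Python) =====
-- def check_genome_matching(genome_1: str, genome_2: str) -> int:
--     """
--     Функция которая проверяет степень близости genome_1 к genome_2.
--
--     :param genome_1: первый геном
--     :type genome_1: str
--     :param genome_2: второй геном
--     :type genome_2: str
--
--     :return: степень близости genome_1 к genome_2
--     :rtype: int
--     """
--     result = 0
--     set_genome_2 = set()
--     for index in range(len(genome_2) - 1):
--         set_genome_2.add(genome_2[index:index + 2])
--
--     for index in range(len(genome_1) - 1):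
--         if genome_1[index:index + 2] in set_genome_2:
--             result += 1
--
--     return result
-- ===== SOURCE B (Python) =====
-- def check_genome_matching(genome_1: str, genome_2: str) -> int:
--     """Sort-and-merge version: sort genome_1's bigrams, sort the distinct
--     bigrams of genome_2, then count matches with a two-pointer merge scan
--     (no per-position hash-set membership test)."""
--     bigrams_1 = sorted(genome_1[i:i + 2] for i in range(len(genome_1) - 1))
--     bigrams_2 = sorted(set(genome_2[i:i + 2] for i in range(len(genome_2) - 1)))
--     i = j = result = 0
--     while i < len(bigrams_1) and j < len(bigrams_2):
--         if bigrams_1[i] < bigrams_2[j]: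
--             i += 1
--         elif bigrams_2[j] < bigrams_1[i]:
--             j += 1
--         else:
--             result += 1
--             i += 1
--     return result
-- ===== Notes on version B (the rewrite author's own statement) =====
-- stated objective: alternative
-- what changed: B replaces A's hash-set membership scan by a sort-based algorithm: it sorts genome_1's bigrams and the distinct sorted bigrams of genome_2 and counts matches with a two-pointer merge scan.
import Mathlib
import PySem

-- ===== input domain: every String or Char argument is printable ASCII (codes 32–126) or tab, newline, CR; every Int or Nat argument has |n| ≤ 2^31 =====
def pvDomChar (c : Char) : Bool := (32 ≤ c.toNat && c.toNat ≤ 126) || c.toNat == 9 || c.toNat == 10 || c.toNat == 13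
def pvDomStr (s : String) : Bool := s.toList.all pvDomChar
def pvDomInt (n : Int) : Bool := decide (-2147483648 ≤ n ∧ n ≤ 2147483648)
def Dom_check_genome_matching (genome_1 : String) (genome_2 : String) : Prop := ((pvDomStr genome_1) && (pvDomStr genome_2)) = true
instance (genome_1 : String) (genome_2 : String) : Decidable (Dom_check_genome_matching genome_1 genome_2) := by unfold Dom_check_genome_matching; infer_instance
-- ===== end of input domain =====

-- B replaces A's hash-set membership scan by a sort-based algorithm: it sorts
-- genome_1's bigrams and the distinct sorted bigrams of genome_2 and counts
-- matches with a two-pointer merge scan (alternative algorithm, not faster).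
-- ===== PORT A =====
def check_genome_matching (genome_1 : String) (genome_2 : String) : Int :=
  let l2 := genome_2.toList
  let set_genome_2 : PySem.Set (List Char) :=
    (PySem.List.pyRange 0 ((l2.length : Int) - 1) 1).foldl
      (fun s index => PySem.Set.add s (PySem.List.slice l2 (some index) (some (index + 2))))
      PySem.Set.empty
  let l1 := genome_1.toList
  (PySem.List.pyRange 0 ((l1.length : Int) - 1) 1).foldl
    (fun result index =>
      if PySem.List.slice l1 (some index) (some (index + 2)) ∈ set_genome_2 then result + 1
      else result)
    0

-- ===== PORT B =====
-- the while loop over the two sorted lists, transcribed as recursion on the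
-- suffixes starting at the two pointers
def cgmMerge : List (List Char) → List (List Char) → Int → Int
  | x :: xs, y :: ys, result =>
    if x < y then cgmMerge xs (y :: ys) result
    else if y < x then cgmMerge (x :: xs) ys result
    else cgmMerge xs (y :: ys) (result + 1)
  | _, _, result => result

def check_genome_matching_alt (genome_1 : String) (genome_2 : String) : Int :=
  let l1 := genome_1.toList
  let l2 := genome_2.toList
  let bigrams_1 :=
    PySem.List.sorted
      ((PySem.List.pyRange 0 ((l1.length : Int) - 1) 1).map
        (fun i => PySem.List.slice l1 (some i) (some (i + 2)))) (fun x => x) false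
  let bigrams_2 :=
    PySem.List.sorted
      (PySem.Set.ofList ((PySem.List.pyRange 0 ((l2.length : Int) - 1) 1).map
        (fun i => PySem.List.slice l2 (some i) (some (i + 2))))) (fun x => x) false
  cgmMerge bigrams_1 bigrams_2 0

-- ===== PRECONDITION & SPEC =====
def Spec_check_genome_matching (genome_1 : String) (genome_2 : String) (out : Int) : Prop := out = check_genome_matching_alt genome_1 genome_2
instance (genome_1 : String) (genome_2 : String) (out : Int) : Decidable (Spec_check_genome_matching genome_1 genome_2 out) := by unfold Spec_check_genome_matching; infer_instance

-- ===== CLAIM (what is proved, stated in full; the proofs are below) =====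
def Claim_equal_check_genome_matching : Prop := ∀ (genome_1 : String) (genome_2 : String), Dom_check_genome_matching genome_1 genome_2 → Spec_check_genome_matching genome_1 genome_2 (check_genome_matching genome_1 genome_2)

-- ===== LEMMAS AND PROOFS =====

-- the list of adjacent bigrams of l (the values both ports' loops slice out)
def pvBigrams (l : List Char) : List (List Char) :=
  (PySem.List.pyRange 0 ((l.length : Int) - 1) 1).map
    (fun index => PySem.List.slice l (some index) (some (index + 2)))

theorem set_loop_eq (l : List Char) :
    (PySem.List.pyRange 0 ((l.length : Int) - 1) 1).foldl
      (fun s index => PySem.Set.add s (PySem.List.slice l (some index) (some (index + 2))))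
      PySem.Set.empty
    = PySem.Set.ofList (pvBigrams l) := by
  rw [PySem.Set.ofList_eq_foldl, pvBigrams, List.foldl_map]
  rfl

theorem foldl_slice_count (l : List Char) (S : PySem.Set (List Char)) :
    ∀ (idxs : List Int) (init : Int),
      idxs.foldl
        (fun r index =>
          if PySem.List.slice l (some index) (some (index + 2)) ∈ S then r + 1 else r) init
      = init + ((idxs.map (fun i => PySem.List.slice l (some i) (some (i + 2)))).countP
          (fun x => decide (x ∈ S)) : Int) := by
  intro idxs
  induction idxs with
  | nil => simp
  | cons i idxs ih =>
    intro init
    by_cases h : PySem.List.slice l (some i) (some (i + 2)) ∈ S <;>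
      simp [h, ih]
    all_goals omega

-- merge scan over a key-sorted left list and a strictly increasing right list
-- counts exactly the left elements that occur in the right list
theorem cgmMerge_count :
    ∀ (xs ys : List (List Char)) (acc : Int),
      xs.Pairwise (· ≤ ·) → ys.Pairwise (· < ·) →
      cgmMerge xs ys acc = acc + (xs.countP (fun x => decide (x ∈ ys)) : Int) := by
  intro xs ys
  induction xs generalizing ys with
  | nil => intro acc _ _; cases ys <;> simp [cgmMerge]
  | cons x xs ihx =>
    intro acc hxs hys
    induction ys generalizing acc with
    | nil => simp [cgmMerge]
    | cons y ys ihy =>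
      rcases List.pairwise_cons.mp hxs with ⟨hx, hxs'⟩
      rcases List.pairwise_cons.mp hys with ⟨hy, hys'⟩
      by_cases h1 : x < y
      · have hne : x ≠ y := fun h => absurd (h ▸ h1) (lt_irrefl y)
        have hnin : x ∉ ys := fun hm => absurd (h1.trans (hy x hm)) (lt_irrefl x)
        rw [cgmMerge, if_pos h1, ihx (y :: ys) acc hxs' hys]
        simp [List.mem_cons, hne, hnin]
      · by_cases h2 : y < x
        · have hdrop : ∀ z ∈ x :: xs, (decide (z ∈ y :: ys)) = (decide (z ∈ ys)) := by
            intro z hz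
            have hyz : y < z := by
              rcases List.mem_cons.mp hz with rfl | hz
              · exact h2
              · exact h2.trans_le (hx z hz)
            have : z ≠ y := fun h => absurd (h ▸ hyz) (lt_irrefl y)
            simp [List.mem_cons, this]
          have hc : (x :: xs).countP (fun z => decide (z ∈ y :: ys))
              = (x :: xs).countP (fun z => decide (z ∈ ys)) := List.countP_congr (fun z hz => by rw [hdrop z hz])
          rw [cgmMerge, if_neg h1, if_pos h2, ihy acc hys', hc]
        · have hxy : x = y := le_antisymm (le_of_not_gt h2) (le_of_not_gt h1)
          subst hxy
          rw [cgmMerge, if_neg h1, if_neg h2, ihx (x :: ys) (acc + 1) hxs' hys]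
          simp [List.mem_cons]
          omega

-- the two elaborations of 'sorted' (core List.instLT vs the LinearOrder instances
-- the PySem order lemmas are stated with) denote the same function
theorem sorted_instLT_eq (B : List (List Char)) :
    @PySem.List.sorted (List Char) (List Char) List.instLT (fun a b => a.decidableLT b) B (fun x => x) false
      = @PySem.List.sorted (List Char) (List Char) List.instLinearOrder.toLT LinearOrder.toDecidableLT B (fun x => x) false := by
  congr 1

theorem merge_sorted_count (B S : List (List Char)) :
    cgmMerge (PySem.List.sorted B (fun x => x) false)
      (PySem.List.sorted (PySem.Set.ofList S) (fun x => x) false) 0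
    = (B.countP (fun z => decide (z ∈ PySem.Set.ofList S)) : Int) := by
  have hp : (PySem.List.sorted B (fun x => x) false).Pairwise (· ≤ ·) := by
    rw [sorted_instLT_eq B]; exact PySem.List.sorted_pairwise B (fun x => x)
  have hq : (PySem.List.sorted (PySem.Set.ofList S) (fun x => x) false).Pairwise (· < ·) := by
    rw [sorted_instLT_eq (PySem.Set.ofList S)]; exact PySem.List.sorted_ofList_pairwise_lt S
  rw [cgmMerge_count _ _ 0 hp hq]
  rw [(PySem.List.sorted_perm B (fun x => x) false).countP_eq]
  simp only [PySem.List.mem_sorted]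
  omega

theorem ports_agree (genome_1 genome_2 : String) :
    check_genome_matching genome_1 genome_2 = check_genome_matching_alt genome_1 genome_2 := by
  simp only [check_genome_matching, check_genome_matching_alt, set_loop_eq, pvBigrams]
  rw [foldl_slice_count, merge_sorted_count]
  omega

-- ===== VERDICT (by name: the statement is the Claim_ definition above) =====
theorem check_genome_matching_spec : Claim_equal_check_genome_matching := by
  intro g1 g2 _
  unfold Spec_check_genome_matching
  exact ports_agree g1 g2
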